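-- pv_equiv track=rewrite | github.com/solve-boj/weekly-challenges | 2022W26/brainer/pgr_12977.py | get_prim_num
-- ===== SOURCE A (Python) =====
-- def is_prime(num):
--     for i in range(2, num):
--         if num % i == 0 and num != i:
--             return False
--     return True
--
-- def get_prim_num(nums):
--     prim_list = []
--     num_len = len(nums)
--
--     for i in range(num_len):
--         for j in range(i+1, num_len):
--             for k in range(j+1, num_len):
--                 sum_num = nums[i] + nums[j] + nums[k]
--                 if is_prime(sum_num):
--                     prim_list.append(sum_num)
--     return prim_list
-- ===== SOURCE B (Python) =====
-- def _is_prime(num):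
--     i = 2
--     while i * i <= num:
--         if num % i == 0:
--             return False
--         i += 1
--     return True
--
--
-- def get_prim_num(nums):
--     n = len(nums)
--     return [s
--             for i in range(n)
--             for j in range(i + 1, n)
--             for k in range(j + 1, n)
--             for s in (nums[i] + nums[j] + nums[k],)
--             if _is_prime(s)]
-- ===== Notes on version B (the rewrite author's own statement) =====
-- stated objective: faster
-- what changed: The O(s) trial division over range(2, s) with its vacuous 'num != i' guard is replaced by a sqrt-bounded trial-division primality test (while i*i <= num), and the triple index loop with append becomes a single comprehension.
import Mathlib
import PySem

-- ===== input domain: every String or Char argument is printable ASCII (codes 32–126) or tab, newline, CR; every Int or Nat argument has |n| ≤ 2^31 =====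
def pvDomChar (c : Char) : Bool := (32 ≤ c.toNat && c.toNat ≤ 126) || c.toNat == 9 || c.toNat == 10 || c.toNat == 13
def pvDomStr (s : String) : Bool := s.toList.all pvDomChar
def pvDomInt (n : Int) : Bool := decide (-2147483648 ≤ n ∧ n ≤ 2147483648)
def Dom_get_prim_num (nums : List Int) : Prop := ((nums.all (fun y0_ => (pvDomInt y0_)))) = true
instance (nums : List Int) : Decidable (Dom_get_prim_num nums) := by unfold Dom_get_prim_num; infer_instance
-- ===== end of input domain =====

-- B replaces A's O(s) trial division over range(2, s) by a sqrt-bounded trial-division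
-- primality test (while i*i <= num), and writes the triple loop as a comprehension (faster).

-- ===== PORT A =====
-- early-return loop of is_prime: for i in range(2, num): if num % i == 0 and num != i: return False
def is_prime_go (num : Int) : List Int → Bool
  | [] => true
  | i :: rest => if PySem.Int.mod num i == 0 && num != i then false else is_prime_go num rest

def is_prime (num : Int) : Bool := is_prime_go num (PySem.List.pyRange 2 num 1)

def get_prim_num (nums : List Int) : List Int :=
  let num_len : Int := PySem.List.len nums
  (PySem.List.pyRange 0 num_len 1).foldl (fun acc i =>
    (PySem.List.pyRange (i + 1) num_len 1).foldl (fun acc j =>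
      (PySem.List.pyRange (j + 1) num_len 1).foldl (fun acc k =>
        let sum_num := PySem.List.pyGetD nums i 0 + PySem.List.pyGetD nums j 0 +
          PySem.List.pyGetD nums k 0
        if is_prime sum_num then acc ++ [sum_num] else acc) acc) acc) []

-- ===== PORT B =====
-- termination helper for the while loop: while i*i <= num the counter i stays ≤ num
theorem pvSqLoopLe {i num : Int} (h : i * i ≤ num) : i ≤ num := by
  nlinarith [mul_self_nonneg (2 * i - 1)]

-- while i*i <= num: if num % i == 0: return False; i += 1
def is_prime_alt_loop (num i : Int) : Bool :=
  if h : i * i ≤ num then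
    if PySem.Int.mod num i == 0 then false else is_prime_alt_loop num (i + 1)
  else true
termination_by (num + 1 - i).toNat
decreasing_by
  have := pvSqLoopLe h
  omega

def is_prime_alt (num : Int) : Bool := is_prime_alt_loop num 2

def get_prim_num_alt (nums : List Int) : List Int :=
  let n : Int := PySem.List.len nums
  (PySem.List.pyRange 0 n 1).flatMap (fun i =>
    (PySem.List.pyRange (i + 1) n 1).flatMap (fun j =>
      (PySem.List.pyRange (j + 1) n 1).flatMap (fun k =>
        let s := PySem.List.pyGetD nums i 0 + PySem.List.pyGetD nums j 0 +
          PySem.List.pyGetD nums k 0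
        if is_prime_alt s then [s] else [])))

-- ===== PRECONDITION & SPEC =====
def Spec_get_prim_num (nums : List Int) (out : List Int) : Prop := out = get_prim_num_alt nums
instance (nums : List Int) (out : List Int) : Decidable (Spec_get_prim_num nums out) := by unfold Spec_get_prim_num; infer_instance

-- ===== CLAIM (what is proved, stated in full; the proofs are below) =====
def Claim_equal_get_prim_num : Prop := ∀ (nums : List Int), Dom_get_prim_num nums → Spec_get_prim_num nums (get_prim_num nums)

-- ===== LEMMAS AND PROOFS =====

-- A's early-return loop is an all-check over the range
theorem is_prime_go_eq_all (num : Int) (l : List Int) :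
    is_prime_go num l = l.all (fun i => !(PySem.Int.mod num i == 0 && num != i)) := by
  induction l with
  | nil => rfl
  | cons i rest ih =>
    rw [is_prime_go, List.all_cons, ih]
    rcases h : (PySem.Int.mod num i == 0 && num != i) with _ | _
    · simp
    · simp

theorem is_prime_iff (num : Int) :
    is_prime num = true ↔ ∀ i : Int, 2 ≤ i → i < num → PySem.Int.mod num i ≠ 0 := by
  rw [is_prime, is_prime_go_eq_all, List.all_eq_true]
  constructor
  · intro h i h2 hlt hmod
    have := h i (by rw [PySem.List.mem_pyRange_one]; exact ⟨h2, hlt⟩)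
    simp only [Bool.not_eq_eq_eq_not, Bool.not_true, Bool.and_eq_false_iff] at this
    rcases this with h' | h'
    · simp [hmod] at h'
    · simp at h'; omega
  · intro h i hi
    rw [PySem.List.mem_pyRange_one] at hi
    have := h i hi.1 hi.2
    have hne : num ≠ i := by omega
    simp [this, hne]

-- characterisation of B's while loop (for i ≥ 2)
theorem is_prime_alt_loop_iff (num : Int) :
    ∀ (n : ℕ) (i : Int), (num + 1 - i).toNat ≤ n → 2 ≤ i →
      (is_prime_alt_loop num i = true ↔
        ∀ j : Int, i ≤ j → j * j ≤ num → PySem.Int.mod num j ≠ 0) := by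
  intro n
  induction n with
  | zero =>
    intro i hle h2
    have hcond : ¬ i * i ≤ num := fun h => by have := pvSqLoopLe h; omega
    rw [is_prime_alt_loop]
    simp only [hcond, dif_neg, not_false_iff]
    constructor
    · intro _ j hij hjj
      exfalso
      have : 2 ≤ j := by omega
      have := pvSqLoopLe hjj
      omega
    · intro _; trivial
  | succ n ih =>
    intro i hle h2
    rw [is_prime_alt_loop]
    by_cases hc : i * i ≤ num
    · simp only [hc, dif_pos]
      by_cases hm : PySem.Int.mod num i == 0
      · simp only [hm, if_pos]
        constructor
        · intro h; exact absurd h (by simp)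
        · intro h
          exfalso
          exact h i le_rfl hc (by simpa using hm)
      · simp only [hm, Bool.false_eq_true, if_false]
        have hin : i ≤ num := pvSqLoopLe hc
        rw [ih (i + 1) (by omega) (by omega)]
        constructor
        · intro h j hij hjj
          by_cases hji : j = i
          · subst hji; simpa using hm
          · exact h j (by omega) hjj
        · intro h j hij hjj
          exact h j (by omega) hjj
    · simp only [hc, dif_neg, not_false_iff]
      constructor
      · intro _ j hij hjj
        exfalso
        nlinarith
      · intro _; trivial

theorem is_prime_alt_iff (num : Int) :
    is_prime_alt num = true ↔ ∀ j : Int, 2 ≤ j → j * j ≤ num → PySem.Int.mod num j ≠ 0 := by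
  exact is_prime_alt_loop_iff num (num - 1).toNat 2 (by omega) le_rfl

-- the two prime tests agree on every integer
theorem prime_eq (num : Int) : is_prime num = is_prime_alt num := by
  rw [Bool.eq_iff_iff, is_prime_iff, is_prime_alt_iff]
  constructor
  · intro h j h2 hjj hmod
    have hlt : j < num := by nlinarith
    exact h j h2 hlt hmod
  · intro h i h2 hlt hmod
    have hdvd : i ∣ num := (PySem.Int.mod_eq_zero_iff_dvd num i).mp hmod
    obtain ⟨q, hq⟩ := hdvd
    have hipos : 0 < i := by omega
    have hq2 : 2 ≤ q := by nlinarith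
    rcases le_total i q with hle | hle
    · exact h i h2 (by nlinarith) hmod
    · refine h q hq2 (by nlinarith) ?_
      exact (PySem.Int.mod_eq_zero_iff_dvd num q).mpr ⟨i, by rw [hq]; ring⟩
  
-- an append-if foldl is a flatMap
theorem foldl_if_append (c : Int → Bool) (f : Int → Int) (l acc : List Int) :
    l.foldl (fun a k => if c k then a ++ [f k] else a) acc
      = acc ++ l.flatMap (fun k => if c k then [f k] else []) := by
  have hfun : (fun (a : List Int) k => if c k then a ++ [f k] else a)
      = (fun a k => a ++ (if c k then [f k] else [])) := by
    funext a k; split <;> simp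
  rw [hfun, PySem.List.foldl_append_eq_flatMap]

-- ===== VERDICT (by name: the statement is the Claim_ definition above) =====
theorem get_prim_num_spec : Claim_equal_get_prim_num := by
  intro nums _
  unfold Spec_get_prim_num
  simp only [get_prim_num, get_prim_num_alt, prime_eq, foldl_if_append,
    PySem.List.foldl_append_eq_flatMap, List.nil_append]
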